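-- pv_equiv track=rewrite | github.com/Claudio1993cg/diagramador-v12-funcional-con-2-patios | diagramador_optimizado/core/engines/fase1_buses.py | _identificar_periodos_baja_demanda
-- ===== SOURCE A (Python) =====
-- from typing import Any, Dict, List, Optional, Set, Tuple
--
-- def _identificar_periodos_baja_demanda(
--     demanda_horaria: Dict[int, int],
--     umbral_baja_demanda: int = 2,
--     duracion_minima_periodo: int = 120,  # 2 horas mínimo
-- ) -> List[Tuple[int, int]]:
--     """
--     Identifica períodos de baja demanda donde se pueden dejar buses en standby.
--
--     Args:
--         demanda_horaria: Diccionario con demanda por ventana de tiempo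
--         umbral_baja_demanda: Cantidad máxima de viajes por ventana para considerar baja demanda
--         duracion_minima_periodo: Duración mínima del período en minutos para considerar standby
--
--     Returns:
--         Lista de tuplas (inicio_periodo, fin_periodo) en minutos desde medianoche
--     """
--     periodos: List[Tuple[int, int]] = []
--
--     if not demanda_horaria:
--         return periodos
--
--     # Obtener todas las ventanas ordenadas
--     ventanas_ordenadas = sorted(demanda_horaria.keys())
--
--     # Buscar períodos consecutivos de baja demanda
--     inicio_periodo = None
--     for ventana in ventanas_ordenadas:
--         cantidad = demanda_horaria[ventana]
--
--         if cantidad <= umbral_baja_demanda: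
--             if inicio_periodo is None:
--                 inicio_periodo = ventana
--         else:
--             # Fin del período de baja demanda
--             if inicio_periodo is not None:
--                 fin_periodo = ventana
--                 duracion = fin_periodo - inicio_periodo
--                 if duracion >= duracion_minima_periodo:
--                     periodos.append((inicio_periodo, fin_periodo))
--                 inicio_periodo = None
--
--     # Si el período continúa hasta el final del día
--     if inicio_periodo is not None:
--         fin_periodo = 1440  # Fin del día
--         duracion = fin_periodo - inicio_periodo
--         if duracion >= duracion_minima_periodo:
--             periodos.append((inicio_periodo, fin_periodo))
--
--     return periodos
-- ===== SOURCE B (Python) =====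
-- from typing import Dict, List, Tuple
--
-- def _identificar_periodos_baja_demanda(
--     demanda_horaria: Dict[int, int],
--     umbral_baja_demanda: int = 2,
--     duracion_minima_periodo: int = 120,
-- ) -> List[Tuple[int, int]]:
--     # Declarative boundary formulation: a period starts at every low key whose
--     # predecessor is missing or high; its end is the first high key after it
--     # (looked up in the separate list of high keys), else 1440.
--     ks = sorted(demanda_horaria)
--
--     def low(k):
--         return demanda_horaria[k] <= umbral_baja_demanda
--
--     starts = [k for prev, k in zip([None] + ks, ks)
--               if low(k) and (prev is None or not low(prev))]
--     highs = [k for k in ks if not low(k)]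
--     periodos: List[Tuple[int, int]] = []
--     for s in starts:
--         e = next((h for h in highs if h > s), 1440)
--         if e - s >= duracion_minima_periodo:
--             periodos.append((s, e))
--     return periodos
-- ===== Notes on version B (the rewrite author's own statement) =====
-- stated objective: alternative
-- what changed: B drops A's stateful scan (Optional inicio_periodo threaded through one loop) for a declarative boundary formulation: period starts are the low keys whose predecessor is missing or high (a zip with the shifted key list), period ends are looked up as the first greater element of the separately built high-key list, with 1440 as default.
import Mathlib
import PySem

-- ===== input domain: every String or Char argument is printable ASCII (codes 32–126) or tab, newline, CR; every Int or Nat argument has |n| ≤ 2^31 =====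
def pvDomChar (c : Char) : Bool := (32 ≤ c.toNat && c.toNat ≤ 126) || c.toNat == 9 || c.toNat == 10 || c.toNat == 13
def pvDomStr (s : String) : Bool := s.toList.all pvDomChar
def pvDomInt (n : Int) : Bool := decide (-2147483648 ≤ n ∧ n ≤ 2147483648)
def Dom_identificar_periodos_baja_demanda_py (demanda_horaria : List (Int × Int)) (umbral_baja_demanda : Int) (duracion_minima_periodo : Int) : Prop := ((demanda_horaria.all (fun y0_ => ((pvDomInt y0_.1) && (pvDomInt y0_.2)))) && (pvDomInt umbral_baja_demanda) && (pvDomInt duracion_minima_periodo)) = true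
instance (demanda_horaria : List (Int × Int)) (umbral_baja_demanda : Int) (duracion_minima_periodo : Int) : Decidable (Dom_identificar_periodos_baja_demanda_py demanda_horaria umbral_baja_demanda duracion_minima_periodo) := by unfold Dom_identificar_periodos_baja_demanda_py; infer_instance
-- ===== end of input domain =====

-- B replaces A's stateful scan by a declarative boundary formulation (period starts = low keys
-- with missing/high predecessor; ends looked up in the separate high-key list): alternative decomposition, same cost.


-- ===== PORT A =====
-- A's loop over the sorted windows, carrying (inicio_periodo : Option Int) and the accumulated periodos.
-- demanda_horaria[ventana] is ported as Dict.getD … 0: exact, since every ventana comes from the dict's keys.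
def pvALoop (d : PySem.Dict Int Int) (u dur : Int) :
    List Int → Option Int → List (Int × Int) → List (Int × Int)
  | [], inicio, periodos =>
      match inicio with
      | some s => if 1440 - s ≥ dur then periodos ++ [(s, 1440)] else periodos
      | none => periodos
  | ventana :: rest, inicio, periodos =>
      let cantidad := d.getD ventana 0
      if cantidad ≤ u then
        match inicio with
        | none => pvALoop d u dur rest (some ventana) periodos
        | some s => pvALoop d u dur rest (some s) periodos
      else
        match inicio with
        | some s =>
            pvALoop d u dur rest none
              (if ventana - s ≥ dur then periodos ++ [(s, ventana)] else periodos)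
        | none => pvALoop d u dur rest none periodos

def identificar_periodos_baja_demanda_py (demanda_horaria : List (Int × Int)) (umbral_baja_demanda : Int) (duracion_minima_periodo : Int) : List (Int × Int) :=
  let d := PySem.Dict.ofList demanda_horaria
  if d.items = [] then []
  else pvALoop d umbral_baja_demanda duracion_minima_periodo
        (PySem.List.sorted d.keys (fun k => k) false) none []

-- ===== PORT B =====
-- Source B: starts = low keys with missing/high predecessor (zip with the shifted key list);
-- highs = the high keys; each start's end = first high key greater than it, else 1440.
def identificar_periodos_baja_demanda_py_alt (demanda_horaria : List (Int × Int)) (umbral_baja_demanda : Int) (duracion_minima_periodo : Int) : List (Int × Int) :=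
  let d := PySem.Dict.ofList demanda_horaria
  let ks := PySem.List.sorted d.keys (fun k => k) false
  let low := fun k => decide (d.getD k 0 ≤ umbral_baja_demanda)
  let starts := (((none :: ks.map some).zip ks).filter
      (fun pk => low pk.2 && (match pk.1 with | none => true | some p => !low p))).map (fun pk => pk.2)
  let highs := ks.filter (fun k => !low k)
  starts.foldl (fun periodos s =>
      let e := ((highs.find? (fun h => decide (s < h))).getD 1440)
      if e - s ≥ duracion_minima_periodo then periodos ++ [(s, e)] else periodos) []

-- ===== PRECONDITION & SPEC =====
def Spec_identificar_periodos_baja_demanda_py (demanda_horaria : List (Int × Int)) (umbral_baja_demanda : Int) (duracion_minima_periodo : Int) (out : List (Int × Int)) : Prop := out = identificar_periodos_baja_demanda_py_alt demanda_horaria umbral_baja_demanda duracion_minima_periodo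
instance (demanda_horaria : List (Int × Int)) (umbral_baja_demanda : Int) (duracion_minima_periodo : Int) (out : List (Int × Int)) : Decidable (Spec_identificar_periodos_baja_demanda_py demanda_horaria umbral_baja_demanda duracion_minima_periodo out) := by unfold Spec_identificar_periodos_baja_demanda_py; infer_instance

-- ===== CLAIM (what is proved, stated in full; the proofs are below) =====
def Claim_equal_identificar_periodos_baja_demanda_py : Prop := ∀ (demanda_horaria : List (Int × Int)) (umbral_baja_demanda : Int) (duracion_minima_periodo : Int), Dom_identificar_periodos_baja_demanda_py demanda_horaria umbral_baja_demanda duracion_minima_periodo → Spec_identificar_periodos_baja_demanda_py demanda_horaria umbral_baja_demanda duracion_minima_periodo (identificar_periodos_baja_demanda_py demanda_horaria umbral_baja_demanda duracion_minima_periodo)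

-- ===== LEMMAS AND PROOFS =====
-- Canonical run decomposition of the flagged (key, low?) list: both ports are proved equal to it.
def pvSkipLow : List (Int × Bool) → Int × List (Int × Bool)
  | [] => (1440, [])
  | (k, lw) :: rest => if lw then pvSkipLow rest else (k, rest)

theorem pvSkipLow_length (xs : List (Int × Bool)) : (pvSkipLow xs).2.length ≤ xs.length := by
  induction xs with
  | nil => simp [pvSkipLow]
  | cons p rest ih =>
      obtain ⟨k, lw⟩ := p
      by_cases h : lw = true <;> simp [pvSkipLow, h] <;> omega

def pvRuns (dur : Int) : List (Int × Bool) → List (Int × Int)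
  | [] => []
  | (k, lw) :: rest =>
      if lw then
        let p := pvSkipLow rest
        (if p.1 - k ≥ dur then [(k, p.1)] else []) ++ pvRuns dur p.2
      else pvRuns dur rest
termination_by xs => xs.length
decreasing_by
  · simpa using Nat.lt_succ_of_le (pvSkipLow_length rest)
  · simp

-- B's pieces over the flagged list.
def pvStarts (ph : Bool) : List (Int × Bool) → List Int
  | [] => []
  | (k, lw) :: rest => (if lw && ph then [k] else []) ++ pvStarts (!lw) rest

def pvHighs (xs : List (Int × Bool)) : List Int := (xs.filter (fun p => !p.2)).map Prod.fst

def pvF (dur : Int) (H : List Int) (s : Int) : Option (Int × Int) :=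
  if ((H.find? (fun h => decide (s < h))).getD 1440) - s ≥ dur
  then some (s, ((H.find? (fun h => decide (s < h))).getD 1440)) else none

-- ===== A-side: stateful scan = run decomposition =====
theorem pvALoop_eq_pvRuns (d : PySem.Dict Int Int) (u dur : Int) (ks : List Int)
    (acc : List (Int × Int)) :
    (pvALoop d u dur ks none acc
        = acc ++ pvRuns dur (ks.map (fun k => (k, decide (d.getD k 0 ≤ u))))) ∧
    (∀ s : Int, pvALoop d u dur ks (some s) acc
        = acc ++ (if (pvSkipLow (ks.map (fun k => (k, decide (d.getD k 0 ≤ u))))).1 - s ≥ dur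
                  then [(s, (pvSkipLow (ks.map (fun k => (k, decide (d.getD k 0 ≤ u))))).1)] else [])
              ++ pvRuns dur (pvSkipLow (ks.map (fun k => (k, decide (d.getD k 0 ≤ u))))).2) := by
  induction ks generalizing acc with
  | nil =>
      constructor
      · simp [pvALoop, pvRuns]
      · intro s
        simp only [pvALoop, List.map_nil, pvSkipLow, pvRuns]
        split_ifs <;> simp
  | cons k rest ih =>
      by_cases h : d.getD k 0 ≤ u
      · constructor
        · simpa [pvALoop, pvRuns, h] using (ih acc).2 k
        · intro s
          simpa [pvALoop, pvSkipLow, h] using (ih acc).2 s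
      · constructor
        · simpa [pvALoop, pvRuns, h] using (ih acc).1
        · intro s
          have h1 := (ih (if k - s ≥ dur then acc ++ [(s, k)] else acc)).1
          simp only [pvALoop, List.map_cons, h, decide_false, pvSkipLow,
            Bool.false_eq_true, if_false] at h1 ⊢
          rw [h1]
          split_ifs <;> simp

-- ===== B-side bridges =====
theorem pvStarts_mem {s : Int} : ∀ {ph : Bool} {xs : List (Int × Bool)},
    s ∈ pvStarts ph xs → s ∈ xs.map Prod.fst := by
  intro ph xs
  induction xs generalizing ph with
  | nil => simp [pvStarts]
  | cons p rest ih =>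
      obtain ⟨k, lw⟩ := p
      simp only [pvStarts, List.mem_append, List.map_cons, List.mem_cons]
      rintro (h | h)
      · split_ifs at h <;> simp_all
      · exact Or.inr (ih h)

theorem pvSkip_cases : ∀ xs : List (Int × Bool),
    (pvSkipLow xs = (1440, ([] : List (Int × Bool))) ∧ pvHighs xs = [] ∧ pvStarts false xs = [])
    ∨ (((pvSkipLow xs).1, false) :: (pvSkipLow xs).2 <:+ xs
        ∧ pvHighs xs = (pvSkipLow xs).1 :: pvHighs (pvSkipLow xs).2
        ∧ pvStarts false xs = pvStarts true (pvSkipLow xs).2) := by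
  intro xs
  induction xs with
  | nil => left; simp [pvSkipLow, pvHighs, pvStarts]
  | cons p rest ih =>
      obtain ⟨k, lw⟩ := p
      cases lw with
      | false =>
          right
          refine ⟨?_, ?_, ?_⟩
          · simp [pvSkipLow]
          · simp [pvSkipLow, pvHighs]
          · simp [pvSkipLow, pvStarts]
      | true =>
          rcases ih with ⟨h1, h2, h3⟩ | ⟨h1, h2, h3⟩
          · left
            refine ⟨?_, ?_, ?_⟩
            · simpa [pvSkipLow] using h1
            · simpa [pvHighs] using h2
            · simpa [pvStarts] using h3
          · right
            have hsk : pvSkipLow ((k, true) :: rest) = pvSkipLow rest := by simp [pvSkipLow]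
            refine ⟨?_, ?_, ?_⟩
            · rw [hsk]; exact h1.trans (List.suffix_cons _ _)
            · rw [hsk]; simpa [pvHighs] using h2
            · rw [hsk]; simpa [pvStarts] using h3

theorem pvF_congr (dur : Int) (h : Int) (H : List Int) (S : List Int)
    (hh : ∀ s ∈ S, ¬ s < h) :
    S.filterMap (pvF dur (h :: H)) = S.filterMap (pvF dur H) := by
  apply List.filterMap_congr
  intro s hs
  have : decide (s < h) = false := by simp [hh s hs]
  simp [pvF, List.find?, this]

-- Main B-side lemma: on a strictly key-sorted flagged list, B's boundary formulation = run decomposition.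
theorem pvBval_eq_runs (dur : Int) : ∀ (n : Nat) (xs : List (Int × Bool)), xs.length ≤ n →
    (xs.map Prod.fst).Pairwise (· < ·) →
    (pvStarts true xs).filterMap (pvF dur (pvHighs xs)) = pvRuns dur xs := by
  intro n
  induction n with
  | zero =>
      intro xs hlen _
      have : xs = [] := by cases xs <;> simp_all
      simp [this, pvStarts, pvRuns]
  | succ n ih =>
      intro xs hlen hp
      cases xs with
      | nil => simp [pvStarts, pvRuns]
      | cons p rest =>
          obtain ⟨k, lw⟩ := p
          simp only [List.map_cons, List.pairwise_cons] at hp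
          obtain ⟨hk, hrest⟩ := hp
          have hlenr : rest.length ≤ n := by simpa using hlen
          cases lw with
          | false =>
              have hcong : ∀ s ∈ pvStarts true rest, ¬ s < k := by
                intro s hs
                have := hk s (pvStarts_mem hs)
                omega
              have hst : pvStarts true ((k, false) :: rest) = pvStarts true rest := by
                simp [pvStarts]
              have hhg : pvHighs ((k, false) :: rest) = k :: pvHighs rest := by simp [pvHighs]
              have hrn : pvRuns dur ((k, false) :: rest) = pvRuns dur rest := by simp [pvRuns]
              rw [hst, hhg, hrn, pvF_congr dur k (pvHighs rest) _ hcong, ih rest hlenr hrest]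
          | true =>
              have hH : pvHighs ((k, true) :: rest) = pvHighs rest := by simp [pvHighs]
              have hst : pvStarts true ((k, true) :: rest) = k :: pvStarts false rest := by
                simp [pvStarts]
              rw [hst, hH, List.filterMap_cons]
              rcases pvSkip_cases rest with ⟨h1, h2, h3⟩ | ⟨h1, h2, h3⟩
              · -- rest is all-low: no highs, no further starts; period ends at 1440
                rw [h3, h2]
                simp only [pvRuns, h1, pvF, List.find?_nil, Option.getD_none,
                  List.filterMap_nil]
                split_ifs <;> simp [pvRuns]
              · -- first high of rest at e := (pvSkipLow rest).1, remainder (pvSkipLow rest).2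
                set e := (pvSkipLow rest).1 with he
                set rem := (pvSkipLow rest).2 with hrem
                have hmem : e ∈ rest.map Prod.fst := by
                  have : (e, false) ∈ rest := h1.sublist.mem (by simp)
                  exact List.mem_map_of_mem this
                have hke : k < e := hk e hmem
                have hprem : ((e, false) :: rem).map Prod.fst |>.Pairwise (· < ·) :=
                  hrest.sublist (h1.sublist.map Prod.fst)
                simp only [List.map_cons, List.pairwise_cons] at hprem
                have hcong : ∀ s ∈ pvStarts true rem, ¬ s < e := by
                  intro s hs
                  have := hprem.1 s (pvStarts_mem hs)
                  omega
                have hlrem : rem.length ≤ n := by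
                  have := h1.sublist.length_le
                  simp at this
                  omega
                rw [h3, h2, pvF_congr dur e (pvHighs rem) _ hcong, ih rem hlrem hprem.2]
                have hfind : List.find? (fun h => decide (k < h)) (e :: pvHighs rem)
                    = some e := by simp [List.find?, hke]
                simp only [pvRuns, pvF, hfind, Option.getD_some]
                split_ifs <;> simp [he, hrem]

-- Port-B shape bridges: the foldl-append loop is a filterMap, the zip/filter starts are pvStarts,
-- the filtered highs are pvHighs.
theorem pvFoldl_emit (dur : Int) (H : List Int) : ∀ (S : List Int) (acc : List (Int × Int)),
    S.foldl (fun periodos s =>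
        let e := ((H.find? (fun h => decide (s < h))).getD 1440)
        if e - s ≥ dur then periodos ++ [(s, e)] else periodos) acc
      = acc ++ S.filterMap (pvF dur H) := by
  intro S
  induction S with
  | nil => simp
  | cons s S ih =>
      intro acc
      simp only [List.foldl_cons, List.filterMap_cons]
      by_cases h : ((H.find? (fun h => decide (s < h))).getD 1440) - s ≥ dur
      · rw [ih]; simp [pvF, h]
      · rw [ih]; simp [pvF, h]

theorem pvZip_starts (g : Int → Bool) : ∀ (ks : List Int) (p : Option Int),
    ((((p :: ks.map some).zip ks).filter
        (fun pk => g pk.2 && (match pk.1 with | none => true | some q => !g q))).map (fun pk => pk.2))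
      = pvStarts (match p with | none => true | some q => !g q) (ks.map (fun k => (k, g k))) := by
  intro ks
  induction ks with
  | nil => intro p; simp [pvStarts]
  | cons k rest ih =>
      intro p
      have := ih (some k)
      simp only [List.map_cons, List.zip_cons_cons, List.filter_cons, pvStarts] at this ⊢
      cases p with
      | none =>
          by_cases h : g k = true <;> simp_all
      | some q =>
          by_cases h : g k = true <;> by_cases h2 : g q = true <;> simp_all

theorem pvFilter_highs (g : Int → Bool) (ks : List Int) :
    ks.filter (fun k => !g k) = pvHighs (ks.map (fun k => (k, g k))) := by
  induction ks with
  | nil => simp [pvHighs]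
  | cons k rest ih =>
      by_cases h : g k = true <;> simp_all [pvHighs, List.filter_cons]

-- Strictly increasing sorted keys.
theorem pvSorted_strict (dh : List (Int × Int)) :
    ((PySem.List.sorted (PySem.Dict.ofList dh).keys (fun k => k) false).Pairwise (· < ·)) := by
  have hle : (PySem.List.sorted (PySem.Dict.ofList dh).keys (fun k => k) false).Pairwise
      (fun a b => (fun k => k) a ≤ (fun k => k) b) := PySem.List.sorted_pairwise _ _
  have hnd : (PySem.List.sorted (PySem.Dict.ofList dh).keys (fun k => k) false).Nodup := by
    have hperm := PySem.List.sorted_perm (PySem.Dict.ofList dh).keys (fun k => k) false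
    exact hperm.nodup_iff.mpr (PySem.Dict.nodup_keys_ofList dh)
  exact (hle.and hnd).imp (fun h => lt_of_le_of_ne h.1 h.2)

-- ===== VERDICT (by name: the statement is the Claim_ definition above) =====
theorem identificar_periodos_baja_demanda_py_spec : Claim_equal_identificar_periodos_baja_demanda_py := by
  intro dh u dur _
  unfold Spec_identificar_periodos_baja_demanda_py
  unfold identificar_periodos_baja_demanda_py identificar_periodos_baja_demanda_py_alt
  set d := PySem.Dict.ofList dh with hd
  set ks := PySem.List.sorted d.keys (fun k => k) false with hks
  set g := fun k => decide (d.getD k 0 ≤ u) with hg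
  have hB : (((((none :: ks.map some).zip ks).filter
        (fun pk => g pk.2 && (match pk.1 with | none => true | some p => !g p))).map (fun pk => pk.2)).foldl
        (fun periodos s =>
          let e := (((ks.filter (fun k => !g k)).find? (fun h => decide (s < h))).getD 1440)
          if e - s ≥ dur then periodos ++ [(s, e)] else periodos) [])
      = pvRuns dur (ks.map (fun k => (k, g k))) := by
    rw [pvFoldl_emit, pvZip_starts, pvFilter_highs]
    simp only [List.nil_append]
    apply pvBval_eq_runs dur (ks.map (fun k => (k, g k))).length _ le_rfl
    have hfst : (ks.map (fun k => (k, g k))).map Prod.fst = ks := by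
      simp [Function.comp_def]
    rw [hfst]
    exact pvSorted_strict dh
  by_cases hemp : d.items = []
  · have hk : d.keys = [] := by simp [PySem.Dict.keys, hemp]
    have hks0 : ks = [] := by rw [hks, hk]; rfl
    rw [if_pos hemp, hB, hks0]
    simp [pvRuns]
  · rw [if_neg hemp, (pvALoop_eq_pvRuns d u dur ks []).1, hB]
    simp [hg]
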